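-- pv_equiv track=rewrite | github.com/SMASHtoolbox/SDAlibrary | python/sdafile/utils.py | are_signatures_equivalent
-- ===== SOURCE A (Python) =====
-- STRUCTURE_EQUIVALENT = {'structure', 'object'}
--
-- CELL_EQUIVALENT = {'cell', 'objects', 'structures'}
--
-- def are_record_types_equivalent(rt1, rt2):
--     """ Determine if record types are equivalent with respect to reading """
--     if rt1 == rt2:
--         return True
--
--     if rt1 in STRUCTURE_EQUIVALENT and rt2 in STRUCTURE_EQUIVALENT:
--         return True
--
--     if rt1 in CELL_EQUIVALENT and rt2 in CELL_EQUIVALENT: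
--         return True
--
--     return False
--
-- def are_signatures_equivalent(sig1, sig2):
--     """ Verify if data signatures are equivalent.
--
--     Parameters
--     ----------
--     sig1, sig2 :
--         Data or group signatures returned by unnest or unnest_record.
--
--     """
--     if len(sig1) != len(sig2):
--         return False
--
--     for item1, item2 in zip(sig1, sig2):
--         key1, rt1 = item1
--         key2, rt2 = item2
--         if key1 != key2:
--             return False
--
--         if not are_record_types_equivalent(rt1, rt2):
--             return False
--
--     return True
-- ===== SOURCE B (Python) =====
-- STRUCTURE_EQUIVALENT = {'structure', 'object'}
--
-- CELL_EQUIVALENT = {'cell', 'objects', 'structures'}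
--
-- def _canon(rt):
--     """Canonical representative of a record type's equivalence class."""
--     if rt in STRUCTURE_EQUIVALENT:
--         return 'structure'
--     if rt in CELL_EQUIVALENT:
--         return 'cell'
--     return rt
--
-- def are_signatures_equivalent(sig1, sig2):
--     """ Verify if data signatures are equivalent. """
--     return [(key, _canon(rt)) for key, rt in sig1] == \
--            [(key, _canon(rt)) for key, rt in sig2]
-- ===== Notes on version B (the rewrite author's own statement) =====
-- stated objective: simpler
-- what changed: Replaces the short-circuiting pairwise loop with delegated equivalence tests by a canonicalization map (each record type mapped to its class representative) followed by a single list equality; the explicit length guard disappears since list equality covers it.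
import Mathlib
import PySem

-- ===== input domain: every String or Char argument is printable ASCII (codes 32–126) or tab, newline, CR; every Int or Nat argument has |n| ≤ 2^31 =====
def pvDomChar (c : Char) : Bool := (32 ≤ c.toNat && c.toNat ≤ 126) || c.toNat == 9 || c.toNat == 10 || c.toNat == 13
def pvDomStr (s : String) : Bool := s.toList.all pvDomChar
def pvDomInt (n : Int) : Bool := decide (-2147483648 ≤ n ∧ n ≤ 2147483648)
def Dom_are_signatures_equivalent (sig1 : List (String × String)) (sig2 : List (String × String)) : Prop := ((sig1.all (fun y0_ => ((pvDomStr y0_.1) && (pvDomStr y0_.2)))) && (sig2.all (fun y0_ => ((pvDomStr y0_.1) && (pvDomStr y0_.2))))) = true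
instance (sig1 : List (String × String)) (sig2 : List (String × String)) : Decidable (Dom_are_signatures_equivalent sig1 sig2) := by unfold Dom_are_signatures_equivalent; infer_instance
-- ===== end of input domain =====

-- B replaces the short-circuiting pairwise loop with a canonicalize-then-compare
-- shape: each record type is mapped to its class representative and the two
-- normalized lists are compared with one equality (objective: simpler).

-- ===== PORT A =====
def pvStructureEquivalent : List String := ["structure", "object"]

def pvCellEquivalent : List String := ["cell", "objects", "structures"]

def are_record_types_equivalent (rt1 : String) (rt2 : String) : Bool :=
  if rt1 == rt2 then true
  else if pvStructureEquivalent.contains rt1 && pvStructureEquivalent.contains rt2 then true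
  else if pvCellEquivalent.contains rt1 && pvCellEquivalent.contains rt2 then true
  else false

-- the 'for item1, item2 in zip(sig1, sig2)' loop, step for step
def pvSigLoop : List (String × String) → List (String × String) → Bool
  | (key1, rt1) :: t1, (key2, rt2) :: t2 =>
    if key1 != key2 then false
    else if !are_record_types_equivalent rt1 rt2 then false
    else pvSigLoop t1 t2
  | _, _ => true

def are_signatures_equivalent (sig1 : List (String × String)) (sig2 : List (String × String)) : Bool :=
  if sig1.length != sig2.length then false
  else pvSigLoop sig1 sig2

-- ===== PORT B =====
def pvCanon (rt : String) : String :=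
  if pvStructureEquivalent.contains rt then "structure"
  else if pvCellEquivalent.contains rt then "cell"
  else rt

def are_signatures_equivalent_alt (sig1 : List (String × String)) (sig2 : List (String × String)) : Bool :=
  (sig1.map (fun p => (p.1, pvCanon p.2))) == (sig2.map (fun p => (p.1, pvCanon p.2)))

-- ===== PRECONDITION & SPEC =====
def Spec_are_signatures_equivalent (sig1 : List (String × String)) (sig2 : List (String × String)) (out : Bool) : Prop := out = are_signatures_equivalent_alt sig1 sig2
instance (sig1 : List (String × String)) (sig2 : List (String × String)) (out : Bool) : Decidable (Spec_are_signatures_equivalent sig1 sig2 out) := by unfold Spec_are_signatures_equivalent; infer_instance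

-- ===== CLAIM (what is proved, stated in full; the proofs are below) =====
def Claim_equal_are_signatures_equivalent : Prop := ∀ (sig1 : List (String × String)) (sig2 : List (String × String)), Dom_are_signatures_equivalent sig1 sig2 → Spec_are_signatures_equivalent sig1 sig2 (are_signatures_equivalent sig1 sig2)

-- ===== LEMMAS AND PROOFS =====

-- ===== VERDICT (by name: the statement is the Claim_ definition above) =====
-- the record-type test of A equals canonical-representative equality
theorem rt_equiv_eq_canon (rt1 rt2 : String) :
    are_record_types_equivalent rt1 rt2 = (pvCanon rt1 == pvCanon rt2) := by
  unfold are_record_types_equivalent pvCanon pvStructureEquivalent pvCellEquivalent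
  by_cases h : rt1 = rt2
  · subst h; simp
  · simp only [List.contains_cons, List.contains_nil, Bool.or_false]
    by_cases h1s : rt1 = "structure" <;> by_cases h1o : rt1 = "object" <;>
      by_cases h1c : rt1 = "cell" <;> by_cases h1x : rt1 = "objects" <;>
      by_cases h1y : rt1 = "structures" <;>
    by_cases h2s : rt2 = "structure" <;> by_cases h2o : rt2 = "object" <;>
      by_cases h2c : rt2 = "cell" <;> by_cases h2x : rt2 = "objects" <;>
      by_cases h2y : rt2 = "structures" <;>
    simp_all <;> (intro he; subst he; simp_all)

theorem loop_eq_map (s1 s2 : List (String × String)) (h : s1.length = s2.length) :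
    pvSigLoop s1 s2 =
      ((s1.map (fun p => (p.1, pvCanon p.2))) == (s2.map (fun p => (p.1, pvCanon p.2)))) := by
  induction s1 generalizing s2 with
  | nil =>
    cases s2 with
    | nil => decide
    | cons b t2 => simp at h
  | cons a t1 ih =>
    cases s2 with
    | nil => simp at h
    | cons b t2 =>
      obtain ⟨k1, r1⟩ := a
      obtain ⟨k2, r2⟩ := b
      simp only [List.length_cons] at h
      show pvSigLoop ((k1, r1) :: t1) ((k2, r2) :: t2) = _
      unfold pvSigLoop
      rw [ih t2 (by omega)]
      by_cases hk : k1 = k2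
      · subst hk
        simp only [bne_self_eq_false, Bool.false_eq_true, if_false, rt_equiv_eq_canon]
        by_cases hr : pvCanon r1 = pvCanon r2
        · simp [hr]
        · simp [hr]
      · simp [hk, bne, Ne.symm]

theorem are_signatures_equivalent_spec : Claim_equal_are_signatures_equivalent := by
  intro sig1 sig2 _
  unfold Spec_are_signatures_equivalent are_signatures_equivalent are_signatures_equivalent_alt
  by_cases h : sig1.length = sig2.length
  · simp only [h, bne_self_eq_false, Bool.false_eq_true, if_false]
    exact loop_eq_map sig1 sig2 h
  · have hm : (sig1.map (fun p => (p.1, pvCanon p.2))).length ≠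
        (sig2.map (fun p => (p.1, pvCanon p.2))).length := by
      simpa using h
    simp only [bne_iff_ne, Ne, h, not_false_iff, if_true]
    symm
    rw [beq_eq_false_iff_ne]
    intro he
    exact hm (by rw [he])
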